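-- pv_equiv track=rewrite | github.com/pwviptbl/ReconForge | plugins/ssl_analyzer.py | _assess_cipher_security
-- ===== SOURCE A (Python) =====
-- from typing import Dict, Any, List, Optional
--
-- def _assess_cipher_security(ciphers: List[str]) -> str:
--     """Avalia nível de segurança das cifras"""
--     if not ciphers:
--         return 'none'
--
--     # Verificar cifras modernas
--     modern_ciphers = ['GCM', 'ECDHE', 'AES256', 'AES128']
--     weak_indicators = ['DES', 'RC4', 'NULL', 'MD5']
--
--     has_modern = any(modern in cipher for cipher in ciphers for modern in modern_ciphers)
--     has_weak = any(weak in cipher for cipher in ciphers for weak in weak_indicators)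
--
--     if has_weak:
--         return 'low'
--     elif has_modern:
--         return 'high'
--     else:
--         return 'medium'
-- ===== SOURCE B (Python) =====
-- _WEAK = ('DES', 'RC4', 'NULL', 'MD5')
-- _MODERN = ('GCM', 'ECDHE', 'AES256', 'AES128')
-- _LEVELS = ('medium', 'high', 'low')
--
-- def _score(cipher):
--     """Numeric severity of one cipher string: weak=2 > modern=1 > other=0."""
--     if any(w in cipher for w in _WEAK):
--         return 2
--     if any(m in cipher for m in _MODERN):
--         return 1
--     return 0
--
-- def _assess_cipher_security(ciphers):
--     """Avalia nível de segurança das cifras"""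
--     if not ciphers:
--         return 'none'
--     return _LEVELS[max(map(_score, ciphers))]
-- ===== Notes on version B (the rewrite author's own statement) =====
-- stated objective: alternative
-- what changed: Replaces the two booleans-plus-branch-chain with an arithmetical formulation: each cipher is mapped to a numeric severity score (weak=2, modern=1, other=0), the maximum score is taken, and the verdict is a lookup of that maximum in a level table; weak-over-modern precedence becomes the numeric order of scores.
import Mathlib
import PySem

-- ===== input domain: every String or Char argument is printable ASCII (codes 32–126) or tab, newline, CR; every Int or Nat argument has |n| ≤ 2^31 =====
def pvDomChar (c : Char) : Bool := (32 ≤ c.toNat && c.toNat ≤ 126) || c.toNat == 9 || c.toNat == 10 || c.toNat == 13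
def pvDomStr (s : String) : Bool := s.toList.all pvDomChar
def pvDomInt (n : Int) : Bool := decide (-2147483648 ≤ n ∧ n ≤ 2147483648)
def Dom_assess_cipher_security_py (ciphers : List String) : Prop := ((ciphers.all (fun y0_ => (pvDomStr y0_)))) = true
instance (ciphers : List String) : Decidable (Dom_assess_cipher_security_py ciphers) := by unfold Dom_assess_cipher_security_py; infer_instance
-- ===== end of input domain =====

-- B replaces A's two any()-scans and branch chain by an arithmetical formulation: per-cipher severity score (weak=2, modern=1, else 0), maximum, table lookup (objective: alternative).

-- ===== PORT A =====
def assess_cipher_security_py (ciphers : List String) : String :=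
  if ciphers = [] then "none"
  else
    let modern_ciphers : List String := ["GCM", "ECDHE", "AES256", "AES128"]
    let weak_indicators : List String := ["DES", "RC4", "NULL", "MD5"]
    let has_modern := ciphers.any (fun cipher => modern_ciphers.any (fun modern => PySem.Str.isIn modern cipher))
    let has_weak := ciphers.any (fun cipher => weak_indicators.any (fun weak => PySem.Str.isIn weak cipher))
    if has_weak then "low"
    else if has_modern then "high"
    else "medium"

-- ===== PORT B =====
-- Source B's _score: numeric severity of one cipher string
def pvScore (cipher : String) : Nat :=
  if (["DES", "RC4", "NULL", "MD5"] : List String).any (fun w => PySem.Str.isIn w cipher) then 2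
  else if (["GCM", "ECDHE", "AES256", "AES128"] : List String).any (fun m => PySem.Str.isIn m cipher) then 1
  else 0

def assess_cipher_security_py_alt (ciphers : List String) : String :=
  match ciphers with
  | [] => "none"
  | c :: rest =>
    -- max(map(_score, ciphers)) over the nonempty list, then _LEVELS[max]
    let m := (rest.map pvScore).foldl Nat.max (pvScore c)
    -- the index m is provably in {0,1,2}, so the .getD default is unreachable
    (PySem.List.pyGet? (["medium", "high", "low"] : List String) (Int.ofNat m)).getD "medium"

-- ===== PRECONDITION & SPEC =====
def Spec_assess_cipher_security_py (ciphers : List String) (out : String) : Prop := out = assess_cipher_security_py_alt ciphers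
instance (ciphers : List String) (out : String) : Decidable (Spec_assess_cipher_security_py ciphers out) := by unfold Spec_assess_cipher_security_py; infer_instance

-- ===== CLAIM =====
def Claim_equal_assess_cipher_security_py : Prop := ∀ (ciphers : List String), Dom_assess_cipher_security_py ciphers → Spec_assess_cipher_security_py ciphers (assess_cipher_security_py ciphers)

-- ===== LEMMAS AND PROOFS =====

def pvWeakB (c : String) : Bool := (["DES", "RC4", "NULL", "MD5"] : List String).any (fun w => PySem.Str.isIn w c)
def pvModB (c : String) : Bool := (["GCM", "ECDHE", "AES256", "AES128"] : List String).any (fun m => PySem.Str.isIn m c)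

theorem pvScore_eq (c : String) : pvScore c = if pvWeakB c then 2 else if pvModB c then 1 else 0 := rfl

-- the max of the scores is determined by A's two flags
theorem foldl_max_score (rest : List String) : ∀ a : Nat,
    (rest.map pvScore).foldl Nat.max a =
      Nat.max a (if rest.any pvWeakB then 2 else if rest.any pvModB then 1 else 0) := by
  induction rest with
  | nil => intro a; simp
  | cons c rest ih =>
    intro a
    simp only [List.map_cons, List.foldl_cons, List.any_cons, ih]
    rw [pvScore_eq]
    by_cases hw : pvWeakB c <;> by_cases hm : pvModB c <;>
      by_cases hw' : rest.any pvWeakB <;> by_cases hm' : rest.any pvModB <;>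
      simp [hw, hm, hw', hm']

-- the whole comparison, abstracted over the four flag booleans
theorem pvCore (w1 w2 m1 m2 : Bool) :
    (if (w1 || w2) then "low" else if (m1 || m2) then "high" else ("medium" : String))
      = (PySem.List.pyGet? (["medium", "high", "low"] : List String)
          (Int.ofNat (Nat.max (if w1 then 2 else if m1 then 1 else 0)
                              (if w2 then 2 else if m2 then 1 else 0)))).getD "medium" := by
  cases w1 <;> cases w2 <;> cases m1 <;> cases m2 <;> rfl

-- ===== VERDICT =====
theorem assess_cipher_security_py_spec : Claim_equal_assess_cipher_security_py := by
  intro ciphers _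
  unfold Spec_assess_cipher_security_py
  match ciphers with
  | [] => rfl
  | c :: rest =>
    show assess_cipher_security_py (c :: rest) = assess_cipher_security_py_alt (c :: rest)
    unfold assess_cipher_security_py assess_cipher_security_py_alt
    simp only [reduceCtorEq, if_false, List.any_cons]
    rw [foldl_max_score, pvScore_eq]
    exact pvCore (pvWeakB c) (rest.any pvWeakB) (pvModB c) (rest.any pvModB)
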